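-- pv_equiv track=rewrite | github.com/mrbartrns/algorithm-and-structure | programmers/lv3_review/p42.py | solution
-- ===== SOURCE A (Python) =====
-- def solution(a):
--     if len(a) <= 2:
--         return len(a)
--     arr = []
--     answer = 0
--     for i in range(len(a)):
--         arr.append((a[i], i))
--     arr.sort(key=lambda x: x[0])
--     f_idx = min(arr[0][1], arr[1][1])
--     s_idx = max(arr[0][1], arr[1][1])
--     for i in range(2, len(arr)):
--         cur_idx = arr[i][1]
--         if f_idx < cur_idx < s_idx:
--             continue
--         answer += 1
--         f_idx = min(f_idx, cur_idx)
--         s_idx = max(cur_idx, s_idx)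
--     return answer + 2
-- ===== SOURCE B (Python) =====
-- def solution(a):
--     n = len(a)
--     left = []
--     m = None
--     for x in a:
--         if m is None or x < m:
--             left.append(True)
--             m = x
--         else:
--             left.append(False)
--     right = [False] * n
--     m = None
--     for i in range(n - 1, -1, -1):
--         if m is None or a[i] <= m:
--             right[i] = True
--             m = a[i]
--     return sum(1 for l, r in zip(left, right) if l or r)
-- ===== Notes on version B (the rewrite author's own statement) =====
-- stated objective: faster
-- what changed: Replaced sort-then-window-scan over (value,index) pairs by two linear passes: an element is counted iff it is a strict prefix minimum or a weak suffix minimum (the running-min passes encode the stable sort's tie-break), so the O(n log n) sort disappears.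
import Mathlib
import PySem

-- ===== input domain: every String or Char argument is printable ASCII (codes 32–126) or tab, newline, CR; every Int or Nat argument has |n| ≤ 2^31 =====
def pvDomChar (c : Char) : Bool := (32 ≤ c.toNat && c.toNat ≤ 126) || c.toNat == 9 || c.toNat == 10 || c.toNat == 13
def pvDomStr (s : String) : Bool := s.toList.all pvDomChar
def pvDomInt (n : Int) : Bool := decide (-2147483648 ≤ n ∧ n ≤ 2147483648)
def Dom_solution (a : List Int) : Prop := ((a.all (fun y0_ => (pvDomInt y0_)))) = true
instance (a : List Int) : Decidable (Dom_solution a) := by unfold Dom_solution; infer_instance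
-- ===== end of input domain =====

-- B replaces A's sort-then-window scan by two linear running-minimum passes (faster: O(n) instead of O(n log n)).

-- ===== PORT A =====
-- loop body of A's second for-loop, verbatim: state is (answer, f_idx, s_idx)
def stepA (st : Int × Int × Int) (p : Int × Int) : Int × Int × Int :=
  if st.2.1 < p.2 ∧ p.2 < st.2.2 then st
  else (st.1 + 1, min st.2.1 p.2, max p.2 st.2.2)

def solution (a : List Int) : Int :=
  if a.length ≤ 2 then (a.length : Int)
  else
    -- for i in range(len(a)): arr.append((a[i], i))
    let arr := (PySem.List.pyRange 0 (a.length : Int) 1).foldl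
        (fun acc i => acc ++ [(PySem.List.pyGetD a i 0, i)]) ([] : List (Int × Int))
    -- arr.sort(key=lambda x: x[0])
    match PySem.List.sorted arr (fun x => x.1) with
    | p0 :: p1 :: rest =>
      let st := rest.foldl stepA (0, min p0.2 p1.2, max p0.2 p1.2)
      st.1 + 2
    | _ => 0  -- unreachable: the sorted list has length = len(a) ≥ 3

-- ===== PORT B =====
-- forward pass: left[i] = True iff a[i] is a strict minimum of the prefix; m is the running min
def leftFlags : List Int → Option Int → List Bool
  | [], _ => []
  | x :: xs, m =>
    let isMin := match m with | none => true | some v => decide (x < v)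
    isMin :: leftFlags xs (if isMin then some x else m)

-- backward pass (the for-loop running n-1 → 0): flags plus the running min of the suffix
def rightFlags : List Int → List Bool × Option Int
  | [] => ([], none)
  | x :: xs =>
    let r := rightFlags xs
    let isMin := match r.2 with | none => true | some v => decide (x ≤ v)
    (isMin :: r.1, if isMin then some x else r.2)

def solution_alt (a : List Int) : Int :=
  let left := leftFlags a none
  let right := (rightFlags a).1
  (((left.zip right).countP (fun p => p.1 || p.2) : Nat) : Int)

-- ===== PRECONDITION & SPEC =====
def Spec_solution (a : List Int) (out : Int) : Prop := out = solution_alt a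
instance (a : List Int) (out : Int) : Decidable (Spec_solution a out) := by unfold Spec_solution; infer_instance

-- ===== CLAIM (what is proved, stated in full; the proofs are below) =====
def Claim_equal_solution : Prop := ∀ (a : List Int), Dom_solution a → Spec_solution a (solution a)

-- ===== LEMMAS AND PROOFS =====

-- the common specification: index i counts iff a[i] is a strict prefix minimum or a weak suffix minimum
abbrev prefMin (a : List Int) (i : Nat) : Prop := ∀ j < i, a.getD i 0 < a.getD j 0
abbrev sufMin (a : List Int) (i : Nat) : Prop := ∀ j < a.length, i < j → a.getD i 0 ≤ a.getD j 0

def specCount (a : List Int) : Nat :=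
  (List.range a.length).countP (fun i => decide (prefMin a i) || decide (sufMin a i))

-- lexicographic order on (value, index) pairs: the order A's stable sort realises
abbrev lexLt (p q : Int × Int) : Prop := p.1 < q.1 ∨ (p.1 = q.1 ∧ p.2 < q.2)

theorem lexLt_irrefl (p : Int × Int) : ¬ lexLt p p := by
  unfold lexLt; omega

theorem lexLt_asym {p q : Int × Int} : lexLt p q → lexLt q p → False := by
  unfold lexLt; omega

-- ---------- A-side: the sorted list is pairwise lexLt ----------

theorem insertBy_lex (x : Int × Int) (acc : List (Int × Int))
    (h1 : acc.Pairwise lexLt) (h2 : ∀ q ∈ acc, q.2 < x.2) :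
    (PySem.List.insertBy (fun a b => decide (a.1 < b.1)) x acc).Pairwise lexLt := by
  induction acc with
  | nil => simp [PySem.List.insertBy]
  | cons y ys ih =>
    rw [List.pairwise_cons] at h1
    obtain ⟨hy, hys⟩ := h1
    by_cases hb : x.1 < y.1
    · have : PySem.List.insertBy (fun a b => decide (a.1 < b.1)) x (y :: ys)
          = x :: y :: ys := by simp [PySem.List.insertBy, hb]
      rw [this, List.pairwise_cons]
      refine ⟨?_, by rw [List.pairwise_cons]; exact ⟨hy, hys⟩⟩
      intro z hz
      rcases List.mem_cons.mp hz with rfl | hz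
      · exact Or.inl hb
      · have := hy z hz
        unfold lexLt at this ⊢
        omega
    · have : PySem.List.insertBy (fun a b => decide (a.1 < b.1)) x (y :: ys)
          = y :: PySem.List.insertBy (fun a b => decide (a.1 < b.1)) x ys := by
        simp [PySem.List.insertBy, hb]
      rw [this, List.pairwise_cons]
      refine ⟨?_, ih hys (fun q hq => h2 q (List.mem_cons_of_mem _ hq))⟩
      intro z hz
      rw [PySem.List.mem_insertBy] at hz
      rcases hz with rfl | hz
      · have hxy := h2 y (List.mem_cons_self)
        unfold lexLt; omega
      · exact hy z hz

theorem foldl_insertBy_lex (l : List (Int × Int)) :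
    ∀ acc : List (Int × Int),
    acc.Pairwise lexLt →
    (∀ p ∈ acc, ∀ q ∈ l, p.2 < q.2) →
    l.Pairwise (fun p q => p.2 < q.2) →
    (l.foldl (fun acc x => PySem.List.insertBy (fun a b => decide (a.1 < b.1)) x acc) acc).Pairwise lexLt := by
  induction l with
  | nil => intro acc h1 _ _; simpa using h1
  | cons x xs ih =>
    intro acc h1 h2 h3
    rw [List.pairwise_cons] at h3
    simp only [List.foldl_cons]
    apply ih
    · exact insertBy_lex x acc h1 (fun q hq => h2 q hq x List.mem_cons_self)
    · intro p hp q hq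
      rw [PySem.List.mem_insertBy] at hp
      rcases hp with rfl | hp
      · exact h3.1 q hq
      · exact h2 p hp q (List.mem_cons_of_mem _ hq)
    · exact h3.2

theorem sorted_fst_pairwise_lex (xs : List (Int × Int))
    (h : xs.Pairwise (fun p q => p.2 < q.2)) :
    (PySem.List.sorted xs (fun x => x.1)).Pairwise lexLt := by
  rw [PySem.List.sorted_eq_foldl_insertBy]
  exact foldl_insertBy_lex xs [] (List.Pairwise.nil) (by simp) h

-- ---------- A-side: the main loop counts exactly the lexLt-extremal indices ----------

abbrev cntP (p : Int × Int) (all : List (Int × Int)) : Prop :=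
  (∀ q ∈ all, lexLt q p → p.2 < q.2) ∨ (∀ q ∈ all, lexLt q p → q.2 < p.2)

def cntB (p : Int × Int) (all : List (Int × Int)) : Bool :=
  (all.all fun q => decide (lexLt q p → p.2 < q.2)) || (all.all fun q => decide (lexLt q p → q.2 < p.2))

theorem cntB_iff (p : Int × Int) (all : List (Int × Int)) : cntB p all = true ↔ cntP p all := by
  simp only [cntB, cntP, Bool.or_eq_true, List.all_eq_true, decide_eq_true_eq]

theorem loopA_spec (t : List (Int × Int)) :
    ∀ (done : List (Int × Int)) (ans f s : Int),
    (done ++ t).Pairwise lexLt →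
    (done ++ t).Pairwise (fun p q => p.2 ≠ q.2) →
    (∀ q ∈ done, f ≤ q.2 ∧ q.2 ≤ s) →
    (∃ q ∈ done, q.2 = f) → (∃ q ∈ done, q.2 = s) →
    (t.foldl stepA (ans, f, s)).1 = ans + (t.countP (fun p => cntB p (done ++ t)) : Nat) := by
  induction t with
  | nil => intro done ans f s _ _ _ _ _; simp
  | cons p t' ih =>
    intro done ans f s hlex hne hbd hf hs
    -- facts from the pairwise hypotheses
    obtain ⟨hld, hlr, hlc⟩ := List.pairwise_append.mp hlex
    obtain ⟨hlp, hlt'⟩ := List.pairwise_cons.mp hlr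
    obtain ⟨hnd, hnr, hnc⟩ := List.pairwise_append.mp hne
    obtain ⟨hnp, hnt'⟩ := List.pairwise_cons.mp hnr
    have hcross : ∀ q ∈ done, lexLt q p := fun q hq => hlc q hq p List.mem_cons_self
    have hnecross : ∀ q ∈ done, q.2 ≠ p.2 := fun q hq => hnc q hq p List.mem_cons_self
    -- the loop's decision agrees with the closed-form predicate
    have hE : cntP p (done ++ p :: t') ↔ (p.2 ≤ f ∨ s ≤ p.2) := by
      constructor
      · rintro (h | h)
        · obtain ⟨qf, hqf, hqfe⟩ := hf
          have := h qf (List.mem_append_left _ hqf) (hcross qf hqf)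
          omega
        · obtain ⟨qs, hqs, hqse⟩ := hs
          have := h qs (List.mem_append_left _ hqs) (hcross qs hqs)
          omega
      · rintro (h | h)
        · left
          intro q hq hlt
          rcases List.mem_append.mp hq with hq | hq
          · have h1 := (hbd q hq).1
            have h2 := hnecross q hq
            omega
          · rcases List.mem_cons.mp hq with rfl | hq
            · exact absurd hlt (lexLt_irrefl _)
            · exact absurd hlt (fun hlt => lexLt_asym (hlp q hq) hlt)
        · right
          intro q hq hlt
          rcases List.mem_append.mp hq with hq | hq
          · have h1 := (hbd q hq).2
            have h2 := hnecross q hq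
            omega
          · rcases List.mem_cons.mp hq with rfl | hq
            · exact absurd hlt (lexLt_irrefl _)
            · exact absurd hlt (fun hlt => lexLt_asym (hlp q hq) hlt)
    have hassoc : (done ++ [p]) ++ t' = done ++ p :: t' := by simp
    by_cases hc : f < p.2 ∧ p.2 < s
    · -- continue: element not counted
      have hdec : stepA (ans, f, s) p = (ans, f, s) := by
        simp [stepA, hc]
      have hfalse : cntB p (done ++ p :: t') = false := by
        rw [← Bool.not_eq_true, cntB_iff, hE]; omega
      have ihr := ih (done ++ [p]) ans f s (by rw [hassoc]; exact hlex) (by rw [hassoc]; exact hne)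
        (by intro q hq
            rcases List.mem_append.mp hq with hq | hq
            · exact hbd q hq
            · rcases List.mem_cons.mp hq with rfl | hq
              · omega
              · simp at hq)
        (by obtain ⟨qf, hqf, hqfe⟩ := hf
            exact ⟨qf, List.mem_append_left _ hqf, hqfe⟩)
        (by obtain ⟨qs, hqs, hqse⟩ := hs
            exact ⟨qs, List.mem_append_left _ hqs, hqse⟩)
      rw [hassoc] at ihr
      simp only [List.foldl_cons, hdec, List.countP_cons, hfalse, ihr]
      simp
    · -- counted: window extended
      have hdec : stepA (ans, f, s) p = (ans + 1, min f p.2, max p.2 s) := by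
        simp only [stepA, if_neg hc]
      have htrue : cntB p (done ++ p :: t') = true := by
        rw [cntB_iff, hE]; omega
      have ihr := ih (done ++ [p]) (ans + 1) (min f p.2) (max p.2 s)
        (by rw [hassoc]; exact hlex) (by rw [hassoc]; exact hne)
        (by intro q hq
            rcases List.mem_append.mp hq with hq | hq
            · have := hbd q hq; omega
            · rcases List.mem_cons.mp hq with rfl | hq
              · omega
              · simp at hq)
        (by rcases le_total f p.2 with h | h
            · obtain ⟨qf, hqf, hqfe⟩ := hf
              exact ⟨qf, List.mem_append_left _ hqf, by omega⟩
            · exact ⟨p, List.mem_append_right _ List.mem_cons_self, by omega⟩)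
        (by rcases le_total p.2 s with h | h
            · obtain ⟨qs, hqs, hqse⟩ := hs
              exact ⟨qs, List.mem_append_left _ hqs, by omega⟩
            · exact ⟨p, List.mem_append_right _ List.mem_cons_self, by omega⟩)
      rw [hassoc] at ihr
      simp only [List.foldl_cons, hdec, List.countP_cons, htrue, ihr]
      push_cast
      ring

-- ---------- A-side: assembling arr ----------

theorem foldl_append_singleton {α β : Type} (f : α → β) (l : List α) (acc : List β) :
    l.foldl (fun acc i => acc ++ [f i]) acc = acc ++ l.map f := by
  induction l generalizing acc with
  | nil => simp
  | cons x xs ih => simp [ih]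

theorem pyRange_cast (n : Nat) :
    PySem.List.pyRange 0 (n : Int) 1 = (List.range n).map (fun j : Nat => (j : Int)) := by
  induction n with
  | zero => rfl
  | succ n ih =>
    have hc : ((n+1 : Nat) : Int) = (n : Int) + 1 := by push_cast; ring
    rw [hc, PySem.List.pyRange_one_append 0 (n:Int) ((n:Int)+1) (by positivity) (by omega)]
    have h1 : PySem.List.pyRange (n:Int) ((n:Int)+1) 1 = [(n:Int)] := by
      rw [PySem.List.pyRange_one_cons (by omega)]
      simp [PySem.List.pyRange]
    rw [h1, List.range_succ, List.map_append, ih]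
    rfl

theorem cntP_iff (a : List Int) (i : Nat) (hi : i < a.length) :
    cntP (a.getD i 0, (i : Int)) ((List.range a.length).map (fun j => (a.getD j 0, (j : Int)))) ↔
      (prefMin a i ∨ sufMin a i) := by
  constructor
  · rintro (h | h)
    · left
      intro j hj
      by_contra h'
      push Not at h'
      have hjn : j < a.length := lt_trans hj hi
      have hlt : lexLt (a.getD j 0, (j : Int)) (a.getD i 0, (i : Int)) := by
        unfold lexLt; simp only; omega
      have := h (a.getD j 0, (j : Int))
        (List.mem_map.mpr ⟨j, List.mem_range.mpr hjn, rfl⟩) hlt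
      simp only at this
      omega
    · right
      intro j hjn hij
      by_contra h'
      push Not at h'
      have hlt : lexLt (a.getD j 0, (j : Int)) (a.getD i 0, (i : Int)) := by
        unfold lexLt; simp only; omega
      have := h (a.getD j 0, (j : Int))
        (List.mem_map.mpr ⟨j, List.mem_range.mpr hjn, rfl⟩) hlt
      simp only at this
      omega
  · rintro (h | h)
    · left
      intro q hq hlt
      obtain ⟨j, hj, rfl⟩ := List.mem_map.mp hq
      rw [List.mem_range] at hj
      simp only
      unfold lexLt at hlt
      simp only at hlt
      rcases lt_trichotomy j i with hji | rfl | hji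
      · have := h j hji
        omega
      · omega
      · omega
    · right
      intro q hq hlt
      obtain ⟨j, hj, rfl⟩ := List.mem_map.mp hq
      rw [List.mem_range] at hj
      simp only
      unfold lexLt at hlt
      simp only at hlt
      rcases lt_trichotomy j i with hji | rfl | hji
      · omega
      · omega
      · have := h j hj hji
        omega

-- ---------- B-side ----------

theorem leftFlags_getD (xs : List Int) :
    ∀ (m : Option Int) (i : Nat), i < xs.length →
    ((leftFlags xs m).getD i false = true ↔
      ((∀ v, m = some v → xs.getD i 0 < v) ∧ ∀ j < i, xs.getD i 0 < xs.getD j 0)) := by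
  induction xs with
  | nil => intro m i hi; simp at hi
  | cons x xs ih =>
    intro m i hi
    match i with
    | 0 =>
      cases m with
      | none => simp [leftFlags]
      | some v => simp [leftFlags]
    | Nat.succ i =>
      have hi' : i < xs.length := by simpa using hi
      -- unfold one step of leftFlags
      cases m with
      | none =>
        rw [show leftFlags (x :: xs) none = true :: leftFlags xs (some x) from rfl]
        rw [List.getD_cons_succ, ih (some x) i hi']
        constructor
        · rintro ⟨h1, h2⟩
          refine ⟨(fun v hv => nomatch hv), ?_⟩
          intro j hj
          match j with
          | 0 => simpa using h1 x rfl
          | Nat.succ j => simpa using h2 j (by omega)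
        · rintro ⟨-, h2⟩
          refine ⟨(fun v hv => by cases hv; simpa using h2 0 (by omega)), ?_⟩
          intro j hj
          simpa using h2 (j + 1) (by omega)
      | some v =>
        by_cases hxv : x < v
        · rw [show leftFlags (x :: xs) (some v) = true :: leftFlags xs (some x) from by
            simp [leftFlags, hxv]]
          rw [List.getD_cons_succ, ih (some x) i hi']
          constructor
          · rintro ⟨h1, h2⟩
            have hx := h1 x rfl
            refine ⟨(fun w hw => by cases hw; simp only [List.getD_cons_succ]; omega), ?_⟩
            intro j hj
            match j with
            | 0 => simpa using hx
            | Nat.succ j => simpa using h2 j (by omega)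
          · rintro ⟨h1, h2⟩
            have hv' := h1 v rfl
            refine ⟨(fun w hw => by cases hw; simpa using h2 0 (by omega)), ?_⟩
            intro j hj
            simpa using h2 (j + 1) (by omega)
        · rw [show leftFlags (x :: xs) (some v) = false :: leftFlags xs (some v) from by
            simp [leftFlags, hxv]]
          rw [List.getD_cons_succ, ih (some v) i hi']
          constructor
          · rintro ⟨h1, h2⟩
            have hv' := h1 v rfl
            refine ⟨(fun w hw => by cases hw; simpa using hv'), ?_⟩
            intro j hj
            match j with
            | 0 => simp only [List.getD_cons_zero, List.getD_cons_succ]; omega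
            | Nat.succ j => simpa using h2 j (by omega)
          · rintro ⟨h1, h2⟩
            refine ⟨(fun w hw => by cases hw; simpa using h1 v rfl), ?_⟩
            intro j hj
            simpa using h2 (j + 1) (by omega)

theorem rightFlags_spec (xs : List Int) :
    ((rightFlags xs).2 = none → xs = []) ∧
    (∀ v, (rightFlags xs).2 = some v → v ∈ xs ∧ ∀ y ∈ xs, v ≤ y) ∧
    (∀ i, i < xs.length →
      ((rightFlags xs).1.getD i false = true ↔
        ∀ j, i < j → j < xs.length → xs.getD i 0 ≤ xs.getD j 0)) := by
  induction xs with
  | nil =>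
    refine ⟨fun _ => rfl, ?_, ?_⟩
    · intro v hv; simp [rightFlags] at hv
    · intro i hi; simp at hi
  | cons x xs ih =>
    obtain ⟨ih1, ih2, ih3⟩ := ih
    cases hm : (rightFlags xs).2 with
    | none =>
      have hnil : xs = [] := ih1 hm
      subst hnil
      refine ⟨(fun h => by simp [rightFlags] at h), ?_, ?_⟩
      · intro v hv
        simp [rightFlags] at hv
        subst hv
        exact ⟨List.mem_cons_self, by intro y hy; rcases List.mem_cons.mp hy with rfl | hy
                                      · exact le_refl _
                                      · simp at hy⟩
      · intro i hi
        have : i = 0 := by simpa using hi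
        subst this
        simp [rightFlags]
        omega
    | some v =>
      obtain ⟨hvmem, hvmin⟩ := ih2 v hm
      have hunf : rightFlags (x :: xs)
          = ((decide (x ≤ v)) :: (rightFlags xs).1, if x ≤ v then some x else some v) := by
        simp only [rightFlags, hm]
        by_cases hxv : x ≤ v <;> simp [hxv]
      refine ⟨?_, ?_, ?_⟩
      · intro h
        rw [hunf] at h
        by_cases hxv : x ≤ v <;> simp [hxv] at h
      · intro w hw
        rw [hunf] at hw
        by_cases hxv : x ≤ v
        · rw [if_pos hxv] at hw
          cases hw
          refine ⟨List.mem_cons_self, ?_⟩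
          intro y hy
          rcases List.mem_cons.mp hy with rfl | hy
          · exact le_refl _
          · exact le_trans hxv (hvmin y hy)
        · rw [if_neg hxv] at hw
          cases hw
          refine ⟨List.mem_cons_of_mem _ hvmem, ?_⟩
          intro y hy
          rcases List.mem_cons.mp hy with rfl | hy
          · omega
          · exact hvmin y hy
      · intro i hi
        rw [hunf]
        match i with
        | 0 =>
          simp only [List.getD_cons_zero, decide_eq_true_eq]
          constructor
          · intro hxv j h0j hj
            match j with
            | Nat.succ j =>
              have hj' : j < xs.length := by simpa using hj
              have hmem' : xs.getD j 0 ∈ xs := by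
                rw [List.getD_eq_getElem _ _ hj']
                exact List.getElem_mem _
              have := hvmin _ hmem'
              simp only [List.getD_cons_succ]
              omega
          · intro h
            obtain ⟨k, hk, rfl⟩ := List.mem_iff_getElem.mp hvmem
            have := h (k + 1) (by omega) (by simpa using hk)
            simp only [List.getD_cons_succ] at this
            rwa [List.getD_eq_getElem _ _ hk] at this
        | Nat.succ i =>
          have hi' : i < xs.length := by simpa using hi
          simp only [List.getD_cons_succ]
          rw [ih3 i hi']
          constructor
          · intro h j hij hj
            match j with
            | Nat.succ j =>
              simp only [List.getD_cons_succ]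
              exact h j (by omega) (by simpa using hj)
          · intro h j hij hj
            have := h (j + 1) (by omega) (by simpa using hj)
            simpa using this

theorem length_leftFlags (xs : List Int) (m : Option Int) : (leftFlags xs m).length = xs.length := by
  induction xs generalizing m with
  | nil => rfl
  | cons x xs ih => simp [leftFlags, ih]

theorem length_rightFlags (xs : List Int) : (rightFlags xs).1.length = xs.length := by
  induction xs with
  | nil => rfl
  | cons x xs ih => simp [rightFlags, ih]

theorem count_zip (L : List Bool) :
    ∀ R : List Bool, L.length = R.length →
    ((L.zip R).countP (fun p => p.1 || p.2)) =
      (List.range L.length).countP (fun i => L.getD i false || R.getD i false) := by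
  induction L with
  | nil => intro R h; simp
  | cons x L ih =>
    intro R h
    cases R with
    | nil => simp at h
    | cons y R =>
      have h' : L.length = R.length := by simpa using h
      simp only [List.zip_cons_cons, List.countP_cons, List.length_cons,
        List.range_succ_eq_map, List.countP_map]
      rw [ih R h']
      simp [Function.comp_def]

theorem solution_alt_eq_specCount (a : List Int) : solution_alt a = (specCount a : Int) := by
  unfold solution_alt specCount
  simp only
  rw [count_zip _ _ (by rw [length_leftFlags, length_rightFlags]), length_leftFlags]
  congr 1
  apply List.countP_congr
  intro i hi
  rw [List.mem_range] at hi
  simp only [Bool.or_eq_true, decide_eq_true_eq]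
  constructor
  · rintro (h | h)
    · left
      intro j hj
      exact ((leftFlags_getD a none i hi).mp h).2 j hj
    · right
      intro j hj hij
      exact ((rightFlags_spec a).2.2 i hi).mp h j hij hj
  · rintro (h | h)
    · left
      exact (leftFlags_getD a none i hi).mpr ⟨(fun v hv => nomatch hv), h⟩
    · right
      exact ((rightFlags_spec a).2.2 i hi).mpr (fun j hij hj => h j hj hij)

theorem cntP_congr_mem (q : Int × Int) {l1 l2 : List (Int × Int)} (h : l1.Perm l2) :
    cntP q l1 ↔ cntP q l2 := by
  unfold cntP
  constructor
  · rintro (hc | hc)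
    · exact Or.inl (fun r hr => hc r (h.mem_iff.mpr hr))
    · exact Or.inr (fun r hr => hc r (h.mem_iff.mpr hr))
  · rintro (hc | hc)
    · exact Or.inl (fun r hr => hc r (h.mem_iff.mp hr))
    · exact Or.inr (fun r hr => hc r (h.mem_iff.mp hr))

theorem solution_eq_specCount (a : List Int) : solution a = (specCount a : Int) := by
  by_cases hn : a.length ≤ 2
  · -- short lists: A returns len(a); every index is a prefix or suffix minimum
    unfold solution specCount
    rw [if_pos hn]
    have hall : ∀ i ∈ List.range a.length,
        (decide (prefMin a i) || decide (sufMin a i)) = true := by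
      intro i hi
      rw [List.mem_range] at hi
      match i with
      | 0 =>
        have h0 : prefMin a 0 := fun j hj => by omega
        simp only [Bool.or_eq_true, decide_eq_true_eq]
        exact Or.inl h0
      | 1 =>
        have h1 : sufMin a 1 := fun j hj h1j => by omega
        simp only [Bool.or_eq_true, decide_eq_true_eq]
        exact Or.inr h1
      | Nat.succ (Nat.succ k) => omega
    rw [List.countP_eq_length.mpr hall, List.length_range]
  · push Not at hn
    -- the arr-building loop produces the list of (value, index) pairs
    set A' := (List.range a.length).map (fun j : Nat => (a.getD j 0, (j : Int))) with hA'
    have harr : (PySem.List.pyRange 0 (a.length : Int) 1).foldl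
        (fun acc i => acc ++ [(PySem.List.pyGetD a i 0, i)]) ([] : List (Int × Int)) = A' := by
      rw [foldl_append_singleton (fun i => (PySem.List.pyGetD a i 0, i)), pyRange_cast,
        List.map_map]
      simp only [hA', Function.comp_def, PySem.List.pyGetD_natCast]
      rfl
    have hA'snd : A'.Pairwise (fun p q => p.2 < q.2) := by
      refine List.Pairwise.map _ ?_ (List.pairwise_lt_range (n := a.length))
      intro i j hij
      simp only
      omega
    have hA'ne : A'.Pairwise (fun p q => p.2 ≠ q.2) :=
      hA'snd.imp (fun h => ne_of_lt h)
    set L := PySem.List.sorted A' (fun x => x.1) with hLdef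
    have hperm : L.Perm A' := PySem.List.sorted_perm A' (fun x => x.1) false
    have hPL : L.Pairwise lexLt := sorted_fst_pairwise_lex A' hA'snd
    have hLne : L.Pairwise (fun p q => p.2 ≠ q.2) :=
      ((hperm.pairwise_iff (fun h => Ne.symm h)).mpr hA'ne)
    have hLlen : L.length = a.length := by
      rw [hperm.length_eq, hA', List.length_map, List.length_range]
    obtain ⟨p0, p1, rest, hL⟩ : ∃ p0 p1 rest, L = p0 :: p1 :: rest := by
      match hLeq : L with
      | [] => simp at hLlen; omega
      | [p0] => simp at hLlen; omega
      | p0 :: p1 :: rest => exact ⟨p0, p1, rest, rfl⟩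
    rw [hL] at hperm hPL hLne
    -- evaluate A's main loop
    have hloop := loopA_spec rest [p0, p1] 0 (min p0.2 p1.2) (max p0.2 p1.2)
      (by exact hPL) (by exact hLne)
      (by intro q hq
          rcases List.mem_cons.mp hq with rfl | hq
          · constructor <;> omega
          · rcases List.mem_cons.mp hq with rfl | hq
            · constructor <;> omega
            · simp at hq)
      (by rcases le_total p0.2 p1.2 with h | h
          · exact ⟨p0, by simp, by omega⟩
          · exact ⟨p1, by simp, by omega⟩)
      (by rcases le_total p0.2 p1.2 with h | h
          · exact ⟨p1, by simp, by omega⟩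
          · exact ⟨p0, by simp, by omega⟩)
    simp only [List.cons_append, List.nil_append] at hloop
    -- the first two sorted elements are always counted
    have hp0 : cntB p0 (p0 :: p1 :: rest) = true := by
      rw [cntB_iff]
      left
      intro q hq hlt
      rcases List.mem_cons.mp hq with rfl | hq
      · exact absurd hlt (lexLt_irrefl _)
      · have hpw := List.pairwise_cons.mp hPL
        exact absurd hlt (fun hlt => lexLt_asym (hpw.1 q hq) hlt)
    have hp1 : cntB p1 (p0 :: p1 :: rest) = true := by
      rw [cntB_iff]
      obtain ⟨h01, hpw2⟩ := List.pairwise_cons.mp hPL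
      obtain ⟨h1r, _⟩ := List.pairwise_cons.mp hpw2
      have hne01 : p0.2 ≠ p1.2 :=
        (List.pairwise_cons.mp hLne).1 p1 List.mem_cons_self
      rcases lt_or_gt_of_ne hne01 with h | h
      · right
        intro q hq hlt
        rcases List.mem_cons.mp hq with rfl | hq
        · exact h
        · rcases List.mem_cons.mp hq with rfl | hq
          · exact absurd hlt (lexLt_irrefl _)
          · exact absurd hlt (fun hlt => lexLt_asym (h1r q hq) hlt)
      · left
        intro q hq hlt
        rcases List.mem_cons.mp hq with rfl | hq
        · exact h
        · rcases List.mem_cons.mp hq with rfl | hq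
          · exact absurd hlt (lexLt_irrefl _)
          · exact absurd hlt (fun hlt => lexLt_asym (h1r q hq) hlt)
    -- count over the whole sorted list, then transport to the original order
    have hcount : (p0 :: p1 :: rest).countP (fun p => cntB p (p0 :: p1 :: rest))
        = rest.countP (fun p => cntB p (p0 :: p1 :: rest)) + 2 := by
      rw [List.countP_cons, List.countP_cons, hp0, hp1]
      simp
    have htrans : (p0 :: p1 :: rest).countP (fun p => cntB p (p0 :: p1 :: rest)) = specCount a := by
      rw [hperm.countP_eq]
      have hcg : A'.countP (fun p => cntB p (p0 :: p1 :: rest)) = A'.countP (fun p => cntB p A') := by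
        apply List.countP_congr
        intro q hq
        rw [cntB_iff, cntB_iff]
        exact cntP_congr_mem q hperm
      rw [hcg, hA', List.countP_map]
      unfold specCount
      apply List.countP_congr
      intro i hi
      rw [List.mem_range] at hi
      simp only [Function.comp_def, cntB_iff, Bool.or_eq_true, decide_eq_true_eq]
      rw [← hA']
      exact cntP_iff a i hi
    -- assemble
    unfold solution
    rw [if_neg (by omega)]
    simp only [harr, ← hLdef, hL]
    rw [hloop, ← htrans, hcount]
    push_cast
    ring

-- ===== VERDICT (by name: the statement is the Claim_ definition above) =====
theorem solution_spec : Claim_equal_solution := by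
  intro a _
  unfold Spec_solution
  rw [solution_eq_specCount, solution_alt_eq_specCount]
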